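-- pv_equiv track=rewrite | github.com/matt-j-harvey/Widefield_Analysis | Movement_Controls/Ridige_Regression/Ridge_Regression_Model.py | get_step_onsets
-- ===== SOURCE A (Python) =====
-- def get_step_onsets(trace, threshold=1, window=3):
--     state = 0
--     number_of_timepoints = len(trace)
--     onset_times = []
--     time_below_threshold = 0
--
--     onset_line = []
--
--     for timepoint in range(number_of_timepoints):
--         if state == 0:
--             if trace[timepoint] > threshold:
--                 state = 1
--                 onset_times.append(timepoint)
--                 time_below_threshold = 0
--             else:
--                 pass
--         elif state == 1:
--             if trace[timepoint] > threshold: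
--                 time_below_threshold = 0
--             else:
--                 time_below_threshold += 1
--                 if time_below_threshold > window:
--                     state = 0
--                     time_below_threshold = 0
--         onset_line.append(state)
--
--     return onset_times, onset_line
-- ===== SOURCE B (Python) =====
-- def get_step_onsets(trace, threshold=1, window=3):
--     # Track the index of the most recent above-threshold sample instead of a
--     # two-state machine with a below-threshold counter; onset/line decisions
--     # become arithmetic on time gaps.
--     w = window if window > 0 else 0
--     onset_times = []
--     onset_line = []
--     last = None  # index of the most recent above-threshold sample
--     for t, x in enumerate(trace):
--         if x > threshold:
--             if last is None or t - last > w + 1: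
--                 onset_times.append(t)
--             last = t
--         onset_line.append(1 if last is not None and t - last <= w else 0)
--     return onset_times, onset_line
-- ===== Notes on version B (the rewrite author's own statement) =====
-- stated objective: simpler
-- what changed: Replaces A's two-state machine with a below-threshold counter by a single pass that tracks only the index of the most recent above-threshold sample; onsets and the 0/1 line are decided by arithmetic on time gaps (gap > window+1 for a new onset, distance <= window for the line).
import Mathlib
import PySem

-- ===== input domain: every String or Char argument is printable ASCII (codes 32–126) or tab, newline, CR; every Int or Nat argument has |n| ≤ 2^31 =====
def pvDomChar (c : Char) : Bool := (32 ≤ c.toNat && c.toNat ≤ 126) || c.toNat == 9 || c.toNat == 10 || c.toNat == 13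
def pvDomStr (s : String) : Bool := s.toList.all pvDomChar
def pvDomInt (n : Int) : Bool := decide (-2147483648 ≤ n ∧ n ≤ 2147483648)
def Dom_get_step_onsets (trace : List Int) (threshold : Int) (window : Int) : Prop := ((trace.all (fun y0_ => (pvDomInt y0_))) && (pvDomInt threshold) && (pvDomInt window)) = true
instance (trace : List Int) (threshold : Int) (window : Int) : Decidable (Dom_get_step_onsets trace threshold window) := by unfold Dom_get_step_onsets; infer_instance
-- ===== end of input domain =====

-- B replaces A's two-state machine with a below-threshold counter by tracking the
-- index of the most recent above-threshold sample (objective: simpler; not faster).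

-- ===== PORT A =====
-- one loop iteration of A: state = (state, onset_times, time_below_threshold, onset_line)
def stepA (threshold window : Int) (st : Int × List Int × Int × List Int)
    (timepoint x : Int) : Int × List Int × Int × List Int :=
  let (state, onset_times, tbt, onset_line) := st
  if state = 0 then
    if x > threshold then
      (1, onset_times ++ [timepoint], 0, onset_line ++ [(1 : Int)])
    else
      (state, onset_times, tbt, onset_line ++ [state])
  else
    if x > threshold then
      (state, onset_times, 0, onset_line ++ [state])
    else
      let tbt' := tbt + 1
      if tbt' > window then
        (0, onset_times, 0, onset_line ++ [(0 : Int)])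
      else
        (state, onset_times, tbt', onset_line ++ [state])

def get_step_onsets (trace : List Int) (threshold : Int) (window : Int) : List Int × List Int :=
  -- for timepoint in range(len(trace)): ... trace[timepoint] is always in range, so pyGetD is exact
  let r := (PySem.List.pyRange 0 (trace.length : Int) 1).foldl
    (fun st timepoint => stepA threshold window st timepoint (PySem.List.pyGetD trace timepoint 0))
    (0, [], 0, [])
  (r.2.1, r.2.2.2)

-- ===== PORT B =====
-- the value appended to onset_line at time t, given the most recent above-threshold index
def lineVal (last : Option Int) (t w : Int) : Int :=
  match last with
  | none => 0
  | some j => if t - j ≤ w then 1 else 0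

-- one loop iteration of B: state = (onset_times, onset_line, last)
def stepB (threshold w : Int) (st : List Int × List Int × Option Int)
    (p : Int × Int) : List Int × List Int × Option Int :=
  let (onset_times, onset_line, last) := st
  let t := p.1
  let x := p.2
  if x > threshold then
    let onset_times' :=
      match last with
      | none => onset_times ++ [t]
      | some j => if t - j > w + 1 then onset_times ++ [t] else onset_times
    let last' := some t
    (onset_times', onset_line ++ [lineVal last' t w], last')
  else
    (onset_times, onset_line ++ [lineVal last t w], last)

def get_step_onsets_alt (trace : List Int) (threshold : Int) (window : Int) : List Int × List Int :=
  let w := if window > 0 then window else 0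
  let r := (PySem.List.enumerate trace 0).foldl (stepB threshold w) ([], [], none)
  (r.1, r.2.1)

-- ===== PRECONDITION & SPEC =====
def Spec_get_step_onsets (trace : List Int) (threshold : Int) (window : Int) (out : List Int × List Int) : Prop := out = get_step_onsets_alt trace threshold window
instance (trace : List Int) (threshold : Int) (window : Int) (out : List Int × List Int) : Decidable (Spec_get_step_onsets trace threshold window out) := by unfold Spec_get_step_onsets; infer_instance

-- ===== CLAIM (what is proved, stated in full; the proofs are below) =====
def Claim_equal_get_step_onsets : Prop := ∀ (trace : List Int) (threshold : Int) (window : Int), Dom_get_step_onsets trace threshold window → Spec_get_step_onsets trace threshold window (get_step_onsets trace threshold window)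

-- ===== LEMMAS AND PROOFS =====

-- coupling invariant between A's (state, time_below_threshold) and B's `last`,
-- at the moment the loops are about to process index s
def StepRel (state tbt : Int) (last : Option Int) (s w : Int) : Prop :=
  (state = 1 ∧ ∃ j, last = some j ∧ 0 ≤ s - 1 - j ∧ tbt = s - 1 - j ∧ tbt ≤ w)
  ∨ (state = 0 ∧ (last = none ∨ ∃ j, last = some j ∧ s - 1 - j > w))

lemma lockstep (threshold window w : Int) (hw : w = max window 0) :
    ∀ (xs : List Int) (s : Int) (state tbt : Int) (times line : List Int) (last : Option Int),
    StepRel state tbt last s w →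
    (((PySem.List.enumerate xs s).foldl
        (fun st p => stepA threshold window st p.1 p.2) (state, times, tbt, line)).2.1
      = ((PySem.List.enumerate xs s).foldl (stepB threshold w) (times, line, last)).1)
    ∧ (((PySem.List.enumerate xs s).foldl
        (fun st p => stepA threshold window st p.1 p.2) (state, times, tbt, line)).2.2.2
      = ((PySem.List.enumerate xs s).foldl (stepB threshold w) (times, line, last)).2.1) := by
  intro xs
  induction xs with
  | nil => intro s state tbt times line last _; simp [PySem.List.enumerate_nil]
  | cons x xs ih =>
      intro s state tbt times line last hrel
      rw [PySem.List.enumerate_cons]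
      simp only [List.foldl_cons]
      rcases hrel with ⟨hstate, j, hlast, hj, htbt, hle⟩ | ⟨hstate, hlast⟩
      · -- state = 1
        subst hstate hlast htbt
        by_cases hx : x > threshold
        · -- above threshold: A resets the counter, B moves `last` to s; no onset on either side
          have hnew : ¬ (s - j > w + 1) := by omega
          simp only [stepA, stepB, if_pos hx, lineVal]
          rw [if_neg (by decide), if_neg hnew, if_pos (show s - s ≤ w by omega)]
          exact ih (s + 1) 1 0 _ _ (some s) (Or.inl ⟨rfl, s, rfl, by omega, by omega, by omega⟩)
        · -- below threshold
          by_cases hdrop : s - 1 - j + 1 > window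
          · -- counter exceeds the window: A drops to state 0; B's line test fails too
            have hgap : ¬ (s - j ≤ w) := by omega
            simp only [stepA, stepB, if_neg hx, lineVal]
            rw [if_neg (by decide), if_pos hdrop, if_neg hgap]
            exact ih (s + 1) 0 0 _ _ (some j) (Or.inr ⟨rfl, Or.inr ⟨j, rfl, by omega⟩⟩)
          · -- still within the window on both sides
            have hgap : s - j ≤ w := by omega
            simp only [stepA, stepB, if_neg hx, lineVal]
            rw [if_neg (by decide), if_neg hdrop, if_pos hgap]
            exact ih (s + 1) 1 _ _ _ (some j) (Or.inl ⟨rfl, j, rfl, by omega, by omega, by omega⟩)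
      · -- state = 0
        subst hstate
        by_cases hx : x > threshold
        · -- above threshold: both sides record an onset at s
          rcases hlast with h | ⟨j, h, hj⟩ <;> subst h
          · simp only [stepA, stepB, if_pos hx, lineVal, if_true]
            rw [if_pos (show s - s ≤ w by omega)]
            exact ih (s + 1) 1 0 _ _ (some s) (Or.inl ⟨rfl, s, rfl, by omega, by omega, by omega⟩)
          · simp only [stepA, stepB, if_pos hx, lineVal, if_true]
            rw [if_pos (show s - j > w + 1 by omega), if_pos (show s - s ≤ w by omega)]
            exact ih (s + 1) 1 0 _ _ (some s) (Or.inl ⟨rfl, s, rfl, by omega, by omega, by omega⟩)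
        · -- below threshold: nothing changes on either side, the line stays 0
          have hline : lineVal last s w = 0 := by
            rcases hlast with h | ⟨j, h, hj⟩ <;> subst h
            · simp [lineVal]
            · simp only [lineVal]; rw [if_neg (by omega)]
          simp only [stepA, stepB, if_neg hx, if_true]
          rw [hline]
          refine ih (s + 1) 0 tbt _ _ last (Or.inr ⟨rfl, ?_⟩)
          rcases hlast with h | ⟨j, h, hj⟩
          · exact Or.inl h
          · exact Or.inr ⟨j, h, by omega⟩

-- ===== VERDICT (by name: the statement is the Claim_ definition above) =====
theorem get_step_onsets_spec : Claim_equal_get_step_onsets := by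
  intro trace threshold window _
  unfold Spec_get_step_onsets get_step_onsets get_step_onsets_alt
  have hb : (PySem.List.enumerate trace 0).foldl
      (fun st p => stepA threshold window st p.1 p.2) ((0 : Int), [], 0, [])
      = (PySem.List.pyRange 0 (trace.length : Int) 1).foldl
      (fun st timepoint => stepA threshold window st timepoint (PySem.List.pyGetD trace timepoint 0))
      ((0 : Int), [], 0, []) := by
    rw [PySem.List.enumerate_eq_map_pyRange (d := 0), List.foldl_map]
    rfl
  set w : Int := if window > 0 then window else 0 with hwdef
  have hw : w = max window 0 := by rw [hwdef]; split_ifs <;> omega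
  have h := lockstep threshold window w hw trace 0 0 0 [] [] none
    (Or.inr ⟨rfl, Or.inl rfl⟩)
  rw [hb] at h
  exact Prod.ext h.1 h.2
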